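-- pv_equiv track=rewrite | github.com/SharpBro/CodeWars | codewars_svolti/non_primi.py | not_primes
-- ===== SOURCE A (Python) =====
-- def not_primes(a, b):
--
--     lsa = ['2', '3', '5', '7']#caratteri accettabili
--
--     flag = 0
--
--     num_non_primi = []
--
--     for i in range(a, b):
--         flag = 0
--         if is_prime(i) == False:#se il numero non e' primo
--             num_in_str = str(i)#converto in stringa
--             for car in num_in_str:
--                 if car not in lsa:#se la cifra non e' accettabili
--                     flag = 1#il flag e' portato a 1
--                     break
--             if flag == 0:
--                 num_non_primi.append(i)#altrimenti il numero va salvato in num_non_primi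
--     return num_non_primi
--
-- def is_prime(n):
--
--     if (n == 2 or  n == 3):
--         return True;
--     if (n % 2 == 0 or n % 3 == 0):
--         return False;
--
--     i = 5;
--     w = 2;
--
--     while (i * i <= n):
--         if (n % i == 0):
--             return False;
--         i += w;
--         w = 6 - w;
--
--     return True;
-- ===== SOURCE B (Python) =====
-- def _has_small_divisor(n):
--     # n >= 2: trial division; True iff n is composite
--     d = 2
--     while d * d <= n:
--         if n % d == 0:
--             return True
--         d += 1
--     return False
--
-- def not_primes(a, b):
--     # Generate, in increasing order, only the numbers whose decimal digits all
--     # lie in {2,3,5,7}, and keep the composite ones inside [a, b).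
--     res = []
--     if b <= 0:
--         return res
--     width = len(str(b - 1))
--     nums = [0]
--     for _ in range(width):
--         nums = [10 * n + d for n in nums for d in (2, 3, 5, 7)]
--         for n in nums:
--             if a <= n < b and _has_small_divisor(n):
--                 res.append(n)
--     return res
-- ===== Notes on version B (the rewrite author's own statement) =====
-- stated objective: faster
-- what changed: Instead of scanning every integer in [a,b) and trial-dividing each, B enumerates in increasing order only the numbers whose decimal digits all lie in {2,3,5,7} (4^width candidates) and keeps the composite ones in [a,b).
import Mathlib
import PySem

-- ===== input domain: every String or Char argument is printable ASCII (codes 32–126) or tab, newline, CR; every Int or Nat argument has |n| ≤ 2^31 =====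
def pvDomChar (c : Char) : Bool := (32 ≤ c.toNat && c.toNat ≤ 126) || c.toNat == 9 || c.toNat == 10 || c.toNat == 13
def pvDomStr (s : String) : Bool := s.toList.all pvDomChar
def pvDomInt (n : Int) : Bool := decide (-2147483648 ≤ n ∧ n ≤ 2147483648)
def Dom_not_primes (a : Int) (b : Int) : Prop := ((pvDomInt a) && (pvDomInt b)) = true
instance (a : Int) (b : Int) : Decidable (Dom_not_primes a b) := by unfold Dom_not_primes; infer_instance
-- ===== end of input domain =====

-- B replaces A's scan of every integer in [a,b) by enumerating, in increasing order,
-- only the numbers whose decimal digits all lie in {2,3,5,7}, keeping the composite ones.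

-- ===== PORT A =====
def pyLsa : List Char := ['2', '3', '5', '7']

-- the `while (i*i <= n)` loop of is_prime; the fuel only makes the loop total:
-- with fuel > n - i (i grows each turn) it is never exhausted
def isPrimeLoop : Nat → Int → Int → Int → Bool
  | 0, _, _, _ => true
  | fuel+1, n, i, w =>
    if i * i ≤ n then
      if PySem.Int.mod n i == 0 then false
      else isPrimeLoop fuel n (i + w) (6 - w)
    else true

def is_prime (n : Int) : Bool :=
  if n == 2 || n == 3 then true
  else if PySem.Int.mod n 2 == 0 || PySem.Int.mod n 3 == 0 then false
  else isPrimeLoop (n.toNat + 1) n 5 2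

-- the inner `for car in num_in_str` loop: the final value of flag (break = early exit)
def carsFlag : List Char → Int
  | [] => 0
  | c :: cs => if !(pyLsa.contains c) then 1 else carsFlag cs

def not_primes (a : Int) (b : Int) : List Int :=
  (PySem.List.pyRange a b 1).foldl
    (fun num_non_primi i =>
      if is_prime i == false then
        (if carsFlag (PySem.Int.toChars i) == 0 then num_non_primi ++ [i] else num_non_primi)
      else num_non_primi) []

-- ===== PORT B =====
-- Source B's _has_small_divisor: trial division d = 2, 3, 4, …  while d*d <= n
def hasSmallLoop (n : Int) (d : Int) : Bool :=
  if d * d ≤ n then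
    if PySem.Int.mod n d == 0 then true else hasSmallLoop n (d + 1)
  else false
termination_by (n + 1 - d).toNat
decreasing_by
  have hd : d ≤ n := by nlinarith
  omega

def hasSmallDivisor (n : Int) : Bool := hasSmallLoop n 2

def not_primes_alt (a : Int) (b : Int) : List Int :=
  if b ≤ 0 then []
  else
    ((PySem.List.pyRange 0 (PySem.Str.len (PySem.Int.toStr (b - 1))) 1).foldl
      (fun (st : List Int × List Int) _ =>
        let nums := st.2.flatMap (fun n => [10*n+2, 10*n+3, 10*n+5, 10*n+7])
        (nums.foldl (fun res n =>
            if decide (a ≤ n) && decide (n < b) && hasSmallDivisor n then res ++ [n] else res)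
          st.1,
         nums))
      (([] : List Int), ([0] : List Int))).1

-- ===== PRECONDITION & SPEC =====
def Spec_not_primes (a : Int) (b : Int) (out : List Int) : Prop := out = not_primes_alt a b
instance (a : Int) (b : Int) (out : List Int) : Decidable (Spec_not_primes a b out) := by unfold Spec_not_primes; infer_instance

-- ===== CLAIM (what is proved, stated in full; the proofs are below) =====
def Claim_equal_not_primes : Prop := ∀ (a : Int) (b : Int), Dom_not_primes a b → Spec_not_primes a b (not_primes a b)

-- ===== LEMMAS AND PROOFS =====

-- the boolean A tests on each i of the range
def condA (x : Int) : Bool := (is_prime x == false) && (carsFlag (PySem.Int.toChars x) == 0)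

-- the boolean B tests on each candidate
def condB (a b x : Int) : Bool := decide (a ≤ x) && decide (x < b) && hasSmallDivisor x

-- the k-th layer of B's candidate generation: cand k = numbers with exactly k digits, all in {2,3,5,7}
def cand : Nat → List Int
  | 0 => [0]
  | k+1 => (cand k).flatMap (fun n => [10*n+2, 10*n+3, 10*n+5, 10*n+7])

-- B's result after L layers
def bResult (a b : Int) (L : Nat) : List Int :=
  (List.range L).flatMap (fun j => (cand (j+1)).filter (condB a b))

-- decimal digit characters of a natural number (what Nat.toDigits computes)
def repc (n : Nat) : List Char :=
  if n / 10 = 0 then [Nat.digitChar (n % 10)]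
  else repc (n / 10) ++ [Nat.digitChar (n % 10)]
termination_by n
decreasing_by omega

lemma A_filter (a b : Int) :
    not_primes a b = (PySem.List.pyRange a b 1).filter condA := by
  unfold not_primes
  rw [PySem.List.foldl_congr_mem _ _ (fun acc x => if condA x then acc ++ [x] else acc) _
    (by intro acc x _
        by_cases h1 : is_prime x == false <;> by_cases h2 : carsFlag (PySem.Int.toChars x) == 0 <;>
          simp [condA, h1, h2])]
  have h := PySem.List.foldl_append_if condA (fun x => x) (PySem.List.pyRange a b 1) []
  simpa using h

lemma layers_go (a b : Int) {gam : Type} : ∀ (l : List gam) (k : Nat),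
    l.foldl
      (fun (st : List Int × List Int) _ =>
        let nums := st.2.flatMap (fun n => [10*n+2, 10*n+3, 10*n+5, 10*n+7])
        (nums.foldl (fun res n =>
            if decide (a ≤ n) && decide (n < b) && hasSmallDivisor n then res ++ [n] else res)
          st.1,
         nums))
      (bResult a b k, cand k)
    = (bResult a b (k + l.length), cand (k + l.length)) := by
  intro l
  induction l with
  | nil => intro k; simp
  | cons x l ih =>
    intro k
    rw [List.foldl_cons]
    have hstep :
        (let nums := (cand k).flatMap (fun n => [10*n+2, 10*n+3, 10*n+5, 10*n+7])
         ((nums.foldl (fun res n =>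
            if decide (a ≤ n) && decide (n < b) && hasSmallDivisor n then res ++ [n] else res)
          (bResult a b k)),
         nums)) = (bResult a b (k+1), cand (k+1)) := by
      have h := PySem.List.foldl_append_if
        (fun n => decide (a ≤ n) && decide (n < b) && hasSmallDivisor n) (fun x => x)
        (cand (k+1)) (bResult a b k)
      show ((cand (k+1)).foldl _ (bResult a b k), cand (k+1)) = _
      rw [h]
      simp only [List.map_id', Prod.mk.injEq, and_true]
      have hfilt : List.filter (fun n => decide (a ≤ n) && decide (n < b) && hasSmallDivisor n) (cand (k+1))
          = List.filter (condB a b) (cand (k+1)) := by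
        congr 1
      rw [hfilt]
      simp [bResult, List.range_succ]
    rw [hstep, ih (k+1)]
    simp only [List.length_cons]
    have e : k + 1 + l.length = k + (l.length + 1) := by omega
    rw [e]

lemma B_layers (a b : Int) (hb : ¬ b ≤ 0) :
    not_primes_alt a b = bResult a b (PySem.Int.toChars (b-1)).length := by
  unfold not_primes_alt
  rw [if_neg hb]
  have hlen : PySem.Str.len (PySem.Int.toStr (b-1)) = ((PySem.Int.toChars (b-1)).length : Int) := by
    rw [PySem.Str.len_eq, PySem.Int.toList_toStr]
  rw [hlen]
  have h0 : (bResult a b 0, cand 0) = ((([] : List Int), ([0] : List Int)) : List Int × List Int) := by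
    simp [bResult, cand]
  rw [← h0, layers_go a b]
  rw [PySem.List.length_pyRange_one]
  simp

lemma cand_bound : ∀ (k : Nat) (x : Int), x ∈ cand (k+1) → 2 * 10^k ≤ x ∧ x < 10^(k+1) := by
  intro k
  induction k with
  | zero =>
    intro x hx
    have hx' : x = 2 ∨ x = 3 ∨ x = 5 ∨ x = 7 := by simpa [cand] using hx
    rcases hx' with rfl|rfl|rfl|rfl <;> decide
  | succ k ih =>
    intro x hx
    rw [show cand (k+2) = (cand (k+1)).flatMap (fun n => [10*n+2, 10*n+3, 10*n+5, 10*n+7]) from rfl,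
      List.mem_flatMap] at hx
    obtain ⟨n, hn, hx⟩ := hx
    obtain ⟨h1, h2⟩ := ih n hn
    have e1 : (10:Int)^(k+1) = 10^k * 10 := pow_succ 10 k
    have e2 : (10:Int)^(k+2) = 10^(k+1) * 10 := pow_succ 10 (k+1)
    simp at hx
    rcases hx with rfl|rfl|rfl|rfl <;> omega

lemma cand_sorted : ∀ k : Nat, (cand k).Pairwise (· < ·) := by
  intro k
  induction k with
  | zero => simp [cand]
  | succ k ih =>
    rw [show cand (k+1) = (cand k).flatMap (fun n => [10*n+2, 10*n+3, 10*n+5, 10*n+7]) from rfl,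
      List.pairwise_flatMap]
    constructor
    · intro n _; simp
    · refine ih.imp ?_
      intro n n' h x hx y hy
      simp at hx hy
      rcases hx with rfl|rfl|rfl|rfl <;> rcases hy with rfl|rfl|rfl|rfl <;> omega

lemma toDigitsCore_eq : ∀ (f n : Nat) (ds : List Char), n < f →
    Nat.toDigitsCore 10 f n ds = repc n ++ ds := by
  intro f
  induction f with
  | zero => intro n ds h; omega
  | succ f ih =>
    intro n ds h
    by_cases h0 : n / 10 = 0
    · simp only [Nat.toDigitsCore, h0, if_true]
      rw [repc, if_pos h0]
      simp
    · simp only [Nat.toDigitsCore, h0, if_false]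
      rw [repc, if_neg h0, ih (n/10) _ (by omega)]
      simp

lemma toChars_of_nonneg (x : Int) (hx : 0 ≤ x) : PySem.Int.toChars x = repc x.toNat := by
  unfold PySem.Int.toChars
  rw [if_neg (by omega)]
  unfold Nat.toDigits
  rw [toDigitsCore_eq _ _ _ (by omega)]
  simp

lemma carsFlag_zero : ∀ cs : List Char, carsFlag cs = 0 ↔ ∀ c ∈ cs, c ∈ pyLsa := by
  intro cs
  induction cs with
  | nil => simp [carsFlag]
  | cons c cs ih =>
    by_cases hc : c ∈ pyLsa
    · simp [carsFlag, hc, ih]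
    · simp [carsFlag, hc]

lemma digitChar_mem (r : Nat) (h10 : r < 10) (hd : Nat.digitChar r ∈ pyLsa) :
    r = 2 ∨ r = 3 ∨ r = 5 ∨ r = 7 := by
  interval_cases r <;> simp_all [pyLsa, Nat.digitChar]

lemma digitChar_mem' (r : Nat) (h : r = 2 ∨ r = 3 ∨ r = 5 ∨ r = 7) :
    Nat.digitChar r ∈ pyLsa := by
  rcases h with rfl|rfl|rfl|rfl <;> simp [pyLsa, Nat.digitChar]

lemma dig_iff : ∀ m : Nat, (∀ c ∈ repc m, c ∈ pyLsa) ↔ ∃ k, ((m : Int) ∈ cand (k+1)) := by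
  intro m
  induction m using Nat.strong_induction_on with
  | _ m ih =>
    rw [repc]
    by_cases h0 : m / 10 = 0
    · rw [if_pos h0]
      have hm10 : m < 10 := by omega
      have hmod : m % 10 = m := by omega
      rw [hmod]
      constructor
      · intro h
        have hd := h (Nat.digitChar m) (by simp)
        have hm : m = 2 ∨ m = 3 ∨ m = 5 ∨ m = 7 := digitChar_mem m (by omega) hd
        refine ⟨0, ?_⟩
        rcases hm with rfl|rfl|rfl|rfl <;> norm_num [cand]
      · rintro ⟨k, hk⟩
        rcases k with _ | k
        · have hv : (m:Int) = 2 ∨ (m:Int) = 3 ∨ (m:Int) = 5 ∨ (m:Int) = 7 := by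
            simpa [cand] using hk
          have hm : m = 2 ∨ m = 3 ∨ m = 5 ∨ m = 7 := by omega
          rcases hm with rfl|rfl|rfl|rfl <;> simp [pyLsa, Nat.digitChar]
        · exfalso
          have h1 := (cand_bound (k+1) (m:Int) hk).1
          have hp : (10:Int)^1 ≤ 10 ^ (k+1) := pow_le_pow_right₀ (by norm_num) (by omega)
          have hmi : (m:Int) < 10 := by exact_mod_cast hm10
          norm_num at hp
          omega
    · rw [if_neg h0]
      have hge : 10 ≤ m := by omega
      have hlt : m / 10 < m := by omega
      have ihm := ih (m/10) hlt
      constructor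
      · intro h
        have hall : ∀ c ∈ repc (m/10), c ∈ pyLsa := fun c hc => h c (by simp [hc])
        have hd := h (Nat.digitChar (m % 10)) (by simp)
        obtain ⟨k, hk⟩ := ihm.mp hall
        have hr : m % 10 = 2 ∨ m % 10 = 3 ∨ m % 10 = 5 ∨ m % 10 = 7 :=
          digitChar_mem (m % 10) (by omega) hd
        refine ⟨k+1, ?_⟩
        rw [show cand (k+2) = (cand (k+1)).flatMap (fun n => [10*n+2, 10*n+3, 10*n+5, 10*n+7]) from rfl,
          List.mem_flatMap]
        refine ⟨((m/10 : Nat) : Int), hk, ?_⟩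
        simp only [List.mem_cons, List.not_mem_nil, or_false]
        rcases hr with h10|h10|h10|h10 <;> omega
      · rintro ⟨k, hk⟩
        rcases k with _ | k
        · have hv : (m:Int) = 2 ∨ (m:Int) = 3 ∨ (m:Int) = 5 ∨ (m:Int) = 7 := by
            simpa [cand] using hk
          exfalso; omega
        · rw [show cand (k+2) = (cand (k+1)).flatMap (fun n => [10*n+2, 10*n+3, 10*n+5, 10*n+7]) from rfl,
            List.mem_flatMap] at hk
          obtain ⟨n, hn, hx⟩ := hk
          have hb := cand_bound k n hn
          have hp : (1:Int) ≤ 10^k := one_le_pow₀ (by norm_num)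
          simp only [List.mem_cons, List.not_mem_nil, or_false] at hx
          have hq : ((m/10 : Nat) : Int) = n := by rcases hx with h10|h10|h10|h10 <;> omega
          have hr : m % 10 = 2 ∨ m % 10 = 3 ∨ m % 10 = 5 ∨ m % 10 = 7 := by
            rcases hx with h10|h10|h10|h10 <;> omega
          have hrec : ∀ c ∈ repc (m/10), c ∈ pyLsa := ihm.mpr ⟨k, by rw [hq]; exact hn⟩
          intro c hc
          rw [List.mem_append] at hc
          rcases hc with hc | hc
          · exact hrec c hc
          · simp only [List.mem_cons, List.not_mem_nil, or_false] at hc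
            subst hc
            exact digitChar_mem' (m % 10) hr

lemma lt_pow_len : ∀ m : Nat, m < 10 ^ (repc m).length := by
  intro m
  induction m using Nat.strong_induction_on with
  | _ m ih =>
    rw [repc]
    by_cases h0 : m / 10 = 0
    · rw [if_pos h0]; simp; omega
    · rw [if_neg h0]
      simp only [List.length_append, List.length_cons, List.length_nil]
      have h1 := ih (m/10) (by omega)
      have e : 10 ^ ((repc (m/10)).length + (0 + 1)) = 10 ^ (repc (m/10)).length * 10 := pow_succ _ _
      omega

lemma digits_iff (x : Int) : carsFlag (PySem.Int.toChars x) = 0 ↔ ∃ k, x ∈ cand (k+1) := by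
  by_cases hx : x < 0
  · constructor
    · intro h
      exfalso
      have ht : PySem.Int.toChars x = '-' :: Nat.toDigits 10 x.natAbs := by
        unfold PySem.Int.toChars; rw [if_pos hx]
      rw [ht] at h
      have : carsFlag ('-' :: Nat.toDigits 10 x.natAbs) = 1 := rfl
      omega
    · rintro ⟨k, hk⟩
      have h1 := (cand_bound k x hk).1
      have h2 : (0:Int) < 10^k := by positivity
      omega
  · rw [toChars_of_nonneg x (by omega), carsFlag_zero]
    have e : ((x.toNat : Int)) = x := Int.toNat_of_nonneg (by omega)
    rw [← e]
    exact dig_iff x.toNat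

lemma hasSmallLoop_iff (n : Int) (d : Int) (hd : 1 ≤ d) :
    (hasSmallLoop n d = true ↔ ∃ m, d ≤ m ∧ m*m ≤ n ∧ PySem.Int.mod n m = 0) := by
  have H : ∀ (t : Nat) (d : Int), 1 ≤ d → (n + 1 - d).toNat ≤ t →
      (hasSmallLoop n d = true ↔ ∃ m, d ≤ m ∧ m*m ≤ n ∧ PySem.Int.mod n m = 0) := by
    intro t
    induction t with
    | zero =>
      intro d hd ht
      have hnd : n < d := by omega
      have hdd : ¬ d * d ≤ n := by nlinarith
      rw [hasSmallLoop, if_neg hdd]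
      simp only [Bool.false_eq_true, false_iff]
      rintro ⟨m, hm, hmm, _⟩
      nlinarith
    | succ t ih =>
      intro d hd ht
      rw [hasSmallLoop]
      by_cases hdd : d * d ≤ n
      · rw [if_pos hdd]
        have hdn : d ≤ n := by nlinarith
        by_cases hm0 : PySem.Int.mod n d = 0
        · rw [if_pos (by simpa using hm0)]
          simp only [true_iff]
          exact ⟨d, le_refl d, hdd, hm0⟩
        · rw [if_neg (by simpa using hm0)]
          rw [ih (d+1) (by omega) (by omega)]
          constructor
          · rintro ⟨m, hm, h1, h2⟩; exact ⟨m, by omega, h1, h2⟩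
          · rintro ⟨m, hm, h1, h2⟩
            have hne : m ≠ d := by rintro rfl; exact hm0 h2
            exact ⟨m, by omega, h1, h2⟩
      · rw [if_neg hdd]
        simp only [Bool.false_eq_true, false_iff]
        rintro ⟨m, hm, hmm, _⟩
        nlinarith
  exact H (n + 1 - d).toNat d hd le_rfl

lemma isPrimeLoop_iff : ∀ (fuel : Nat) (n i w : Int), 5 ≤ i → n < i + fuel →
    ((w = 2 ∧ i % 6 = 5) ∨ (w = 4 ∧ i % 6 = 1)) →
    (isPrimeLoop fuel n i w = true ↔
      ∀ m, i ≤ m → m*m ≤ n → (m % 6 = 1 ∨ m % 6 = 5) → ¬ (m ∣ n)) := by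
  intro fuel
  induction fuel with
  | zero =>
    intro n i w hi hfuel hw
    simp only [isPrimeLoop, true_iff]
    intro m him hmm h6 hdvd
    push_cast at hfuel
    have h1 : i * i ≤ m * m := mul_le_mul him him (by omega) (by omega)
    have h2 : i ≤ i * i := le_mul_of_one_le_left (by omega) (by omega)
    linarith
  | succ fuel ih =>
    intro n i w hi hfuel hw
    have hwpos : 0 < w := by rcases hw with ⟨rfl, _⟩ | ⟨rfl, _⟩ <;> norm_num
    simp only [isPrimeLoop]
    by_cases hdd : i * i ≤ n
    · rw [if_pos hdd]
      have hmod : PySem.Int.mod n i = n % i := PySem.Int.mod_eq_emod_of_pos (by omega)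
      by_cases h0 : n % i = 0
      · rw [if_pos (by simp [hmod, h0])]
        simp only [Bool.false_eq_true, false_iff]
        push Not
        have h6i : i % 6 = 1 ∨ i % 6 = 5 := by rcases hw with ⟨_, h⟩ | ⟨_, h⟩ <;> omega
        exact ⟨i, le_rfl, hdd, h6i, Int.dvd_of_emod_eq_zero h0⟩
      · rw [if_neg (by simp [hmod, h0])]
        have hw' : ((6 - w = 2 ∧ (i + w) % 6 = 5) ∨ (6 - w = 4 ∧ (i + w) % 6 = 1)) := by
          rcases hw with ⟨rfl, h⟩ | ⟨rfl, h⟩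
          · right; constructor; · norm_num
            omega
          · left; constructor; · norm_num
            omega
        rw [ih n (i+w) (6-w) (by omega) (by omega) hw']
        constructor
        · intro H m him hmm h6
          by_cases hlt : m < i + w
          · have hmi : m = i := by rcases hw with ⟨rfl, hp⟩ | ⟨rfl, hp⟩ <;> omega
            subst hmi
            intro hdvd
            exact h0 (Int.emod_eq_zero_of_dvd hdvd)
          · exact H m (by omega) hmm h6
        · intro H m him hmm h6
          exact H m (by omega) hmm h6
    · rw [if_neg hdd]
      simp only [true_iff]
      intro m him hmm h6 hdvd
      have h1 : i * i ≤ m * m := mul_le_mul him him (by omega) (by omega)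
      linarith
  

lemma is_prime_iff (n : Int) (hn : 2 ≤ n) : (is_prime n = true ↔ hasSmallDivisor n = false) := by
  have hB : hasSmallDivisor n = false ↔ ¬ ∃ m, 2 ≤ m ∧ m*m ≤ n ∧ m ∣ n := by
    have h1 := hasSmallLoop_iff n 2 (by norm_num)
    simp only [PySem.Int.mod_eq_zero_iff_dvd] at h1
    rw [← h1]
    cases h : hasSmallLoop n 2 <;> simp [hasSmallDivisor, h]
  rw [hB]
  unfold is_prime
  by_cases h23 : n = 2 ∨ n = 3
  · rw [if_pos (by rcases h23 with rfl | rfl <;> simp)]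
    simp only [true_iff]
    rintro ⟨m, hm, hmm, _⟩
    rcases h23 with rfl | rfl <;> nlinarith
  · rw [if_neg (by simp; omega)]
    by_cases h2 : n % 2 = 0
    · rw [if_pos (by simp [h2])]
      simp only [Bool.false_eq_true, false_iff, not_not]
      refine ⟨2, le_refl 2, by omega, Int.dvd_of_emod_eq_zero h2⟩
    · by_cases h3 : n % 3 = 0
      · rw [if_pos (by simp [h3])]
        simp only [Bool.false_eq_true, false_iff, not_not]
        refine ⟨3, by norm_num, by omega, Int.dvd_of_emod_eq_zero h3⟩
      · rw [if_neg (by simp [h2, h3])]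
        rw [isPrimeLoop_iff (n.toNat + 1) n 5 2 (by norm_num) (by omega)
          (Or.inl ⟨rfl, by norm_num⟩)]
        constructor
        · intro H
          rintro ⟨m, hm2', hmm, hdvd⟩
          have hm2n : m % 2 ≠ 0 := by
            intro h
            exact h2 (Int.emod_eq_zero_of_dvd (dvd_trans (Int.dvd_of_emod_eq_zero h) hdvd))
          have hm3n : m % 3 ≠ 0 := by
            intro h
            exact h3 (Int.emod_eq_zero_of_dvd (dvd_trans (Int.dvd_of_emod_eq_zero h) hdvd))
          have hm5 : 5 ≤ m := by omega
          have h6 : m % 6 = 1 ∨ m % 6 = 5 := by omega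
          exact H m hm5 hmm h6 hdvd
        · intro H m hm5 hmm h6 hdvd
          exact H ⟨m, by omega, hmm, hdvd⟩

lemma mem_iff (a b x : Int) : x ∈ not_primes a b ↔ x ∈ not_primes_alt a b := by
  have memA : x ∈ not_primes a b ↔
      (a ≤ x ∧ x < b) ∧ is_prime x = false ∧ carsFlag (PySem.Int.toChars x) = 0 := by
    rw [A_filter]
    simp [List.mem_filter, PySem.List.mem_pyRange_one, condA, and_assoc]
  rw [memA]
  by_cases hb : b ≤ 0
  · unfold not_primes_alt
    rw [if_pos hb]
    simp only [List.not_mem_nil, iff_false]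
    rintro ⟨⟨_, hxb⟩, _, hflag⟩
    obtain ⟨k, hk⟩ := (digits_iff x).mp hflag
    have h1 := (cand_bound k x hk).1
    have hp : (0:Int) < 10^k := by positivity
    omega
  · rw [B_layers a b hb]
    simp only [bResult, List.mem_flatMap, List.mem_range, List.mem_filter]
    constructor
    · rintro ⟨⟨hax, hxb⟩, hpr, hflag⟩
      obtain ⟨k, hk⟩ := (digits_iff x).mp hflag
      have hbd := cand_bound k x hk
      have hp1 : (1:Int) ≤ 10^k := one_le_pow₀ (by norm_num)
      have hx2 : 2 ≤ x := by omega
      refine ⟨k, ?_, hk, ?_⟩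
      · -- k < width
        have hW := lt_pow_len (b-1).toNat
        have hWe : PySem.Int.toChars (b-1) = repc (b-1).toNat := toChars_of_nonneg _ (by omega)
        rw [hWe]
        by_contra hkW
        rw [not_lt] at hkW
        have hmono : (10:Int) ^ (repc (b-1).toNat).length ≤ 10 ^ k :=
          pow_le_pow_right₀ (by norm_num) hkW
        have hWi : ((b-1).toNat : Int) < (10:Int) ^ (repc (b-1).toNat).length := by
          exact_mod_cast hW
        omega
      · simp only [condB, hax, hxb, decide_true, Bool.true_and]
        have hip := is_prime_iff x hx2
        cases h1 : is_prime x <;> cases h2 : hasSmallDivisor x <;> simp_all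
    · rintro ⟨j, hjW, hmem, hcond⟩
      simp only [condB, Bool.and_eq_true, decide_eq_true_eq] at hcond
      obtain ⟨⟨hax, hxb⟩, hsmall⟩ := hcond
      have hbd := cand_bound j x hmem
      have hp1 : (1:Int) ≤ 10^j := one_le_pow₀ (by norm_num)
      have hx2 : 2 ≤ x := by omega
      refine ⟨⟨hax, hxb⟩, ?_, (digits_iff x).mpr ⟨j, hmem⟩⟩
      have hip := is_prime_iff x hx2
      cases h1 : is_prime x <;> simp_all

lemma sorted_A (a b : Int) : (not_primes a b).Pairwise (· < ·) := by
  rw [A_filter]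
  exact List.Pairwise.sublist List.filter_sublist (PySem.List.pairwise_lt_pyRange_one a b)

lemma sorted_B (a b : Int) : (not_primes_alt a b).Pairwise (· < ·) := by
  by_cases hb : b ≤ 0
  · unfold not_primes_alt
    rw [if_pos hb]
    simp
  · rw [B_layers a b hb]
    rw [bResult, List.pairwise_flatMap]
    constructor
    · intro j _
      exact List.Pairwise.sublist List.filter_sublist (cand_sorted (j+1))
    · refine (List.pairwise_lt_range).imp ?_
      intro j j' hjj x hx y hy
      have hx' := cand_bound j x (List.mem_of_mem_filter hx)
      have hy' := cand_bound j' y (List.mem_of_mem_filter hy)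
      have h1 : (10:Int)^(j+1) ≤ 10^(j') := pow_le_pow_right₀ (by norm_num) (by omega)
      have h2 : (0:Int) ≤ 10^(j') := by positivity
      omega

-- ===== VERDICT (by name: the statement is the Claim_ definition above) =====
theorem not_primes_spec : Claim_equal_not_primes := by
  intro a b _
  unfold Spec_not_primes
  have hA := sorted_A a b
  have hB := sorted_B a b
  refine List.Perm.eq_of_pairwise (fun x y _ _ hxy hyx => absurd hyx (not_lt.mpr (le_of_lt hxy))) hA hB ?_
  exact (List.perm_ext_iff_of_nodup (hA.imp (fun h => ne_of_lt h)) (hB.imp (fun h => ne_of_lt h))).mpr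
    (fun x => mem_iff a b x)
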